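-- pv_equiv track=rewrite | github.com/highlyprofitable108/top-secret-modeling | classes/utils.py | get_active_constants
-- ===== SOURCE A (Python) =====
-- from collections import defaultdict
--
-- def get_active_constants(feature_columns, TARGET_VARIABLE):
--     active_constants = list(set(col for col in feature_columns if col != TARGET_VARIABLE))
--     active_constants.sort()
--
--     # Categorizing the constants
--     categories = defaultdict(list)
--     for constant in active_constants:
--         constant = constant.replace(' Difference', '').replace(' Ratio', '')
--         category = constant.split('.')[0]
--         categories[category].append(constant)
--
--     # Sorting the constants within each category
--     def sort_key(x):
--         parts = x.split('.')
--         return parts[1] if len(parts) > 1 else parts[0]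
--
--     sorted_categories = {category: sorted(sub_categories, key=sort_key) for category, sub_categories in categories.items()}
--     return sorted_categories
-- ===== SOURCE B (Python) =====
-- def get_active_constants(feature_columns, TARGET_VARIABLE):
--     # dedupe, sort globally (tie-breaker), then clean the strings
--     cleaned = [c.replace(' Difference', '').replace(' Ratio', '')
--                for c in sorted({c for c in feature_columns if c != TARGET_VARIABLE})]
--
--     def cat(s):
--         return s.split('.')[0]
--
--     def sort_key(x):
--         parts = x.split('.')
--         return parts[1] if len(parts) > 1 else parts[0]
--
--     # no dict accumulation at all: for each distinct category, in first-appearance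
--     # order, select its members by a filtered scan and sort that selection.
--     return {k: sorted((c for c in cleaned if cat(c) == k), key=sort_key)
--             for k in dict.fromkeys(map(cat, cleaned))}
-- ===== Notes on version B (the rewrite author's own statement) =====
-- stated objective: alternative
-- what changed: A accumulates a defaultdict of buckets in one mutating pass and then sorts each bucket; B uses no dict accumulator at all: it dedups the category keys in first-appearance order and builds each group directly by a filtered scan over the cleaned list plus a per-group sort, trading speed on many-category inputs (O(n*k) scans) for a dict-free declarative decomposition.
import Mathlib
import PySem

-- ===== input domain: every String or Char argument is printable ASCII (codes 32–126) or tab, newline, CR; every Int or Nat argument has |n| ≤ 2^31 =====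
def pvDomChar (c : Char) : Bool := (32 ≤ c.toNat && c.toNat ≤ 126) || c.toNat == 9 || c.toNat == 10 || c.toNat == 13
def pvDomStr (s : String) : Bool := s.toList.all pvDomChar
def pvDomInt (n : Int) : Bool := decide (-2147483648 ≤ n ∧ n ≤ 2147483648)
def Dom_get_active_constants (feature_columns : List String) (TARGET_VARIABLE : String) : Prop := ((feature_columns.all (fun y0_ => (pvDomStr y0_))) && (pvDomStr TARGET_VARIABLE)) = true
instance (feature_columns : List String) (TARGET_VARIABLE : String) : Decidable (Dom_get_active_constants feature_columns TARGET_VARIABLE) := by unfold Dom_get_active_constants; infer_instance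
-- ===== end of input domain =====

-- B drops A's mutating defaultdict accumulation entirely: it dedups the category keys in
-- first-appearance order and builds each group by a filtered scan plus a per-group sort
-- (alternative decomposition, same observable result).

-- shared helpers: both Python versions use the same replace/split expressions
-- c.replace(' Difference', '').replace(' Ratio', '')
def pvRepl (c : String) : String :=
  PySem.Str.replace (PySem.Str.replace c " Difference" "") " Ratio" ""
-- x.split('.')  (separator is the non-empty literal '.', so split? never returns none;
-- the .getD default is unreachable)
def pvSplitDot (s : String) : List String := (PySem.Str.split? s ".").getD [s]
-- x.split('.')[0]  (split always yields a non-empty list, so headD's default is unreachable)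
def pvCatOf (s : String) : String := (pvSplitDot s).headD ""
-- sort_key(x): parts[1] if len(parts) > 1 else parts[0]
def pvSortKey (x : String) : String :=
  let parts := pvSplitDot x
  if 1 < parts.length then parts.getD 1 "" else parts.headD ""

-- ===== PORT A =====
def get_active_constants (feature_columns : List String) (TARGET_VARIABLE : String) : List (String × List String) :=
  -- active_constants = list(set(col for col in feature_columns if col != TARGET_VARIABLE)); .sort()
  let active_constants :=
    PySem.List.sorted (PySem.Set.ofList (feature_columns.filter (fun col => col != TARGET_VARIABLE))) (fun x => x)
  -- categories = defaultdict(list); for constant in active_constants: … append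
  let categories :=
    active_constants.foldl
      (fun d constant =>
        let constant' := pvRepl constant
        d.modify (pvCatOf constant') [] (fun l => l ++ [constant']))
      (PySem.Dict.empty : PySem.Dict String (List String))
  -- {category: sorted(sub_categories, key=sort_key) for …}
  categories.items.map (fun p => (p.1, PySem.List.sorted p.2 pvSortKey))

-- ===== PORT B =====
def get_active_constants_alt (feature_columns : List String) (TARGET_VARIABLE : String) : List (String × List String) :=
  -- cleaned = [replace… for c in sorted({c for c in feature_columns if c != TARGET_VARIABLE})]
  let cleaned :=
    (PySem.List.sorted (PySem.Set.ofList (feature_columns.filter (fun c => c != TARGET_VARIABLE))) (fun x => x)).map pvRepl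
  -- {k: sorted((c for c in cleaned if cat(c) == k), key=sort_key) for k in dict.fromkeys(map(cat, cleaned))}
  (PySem.List.dedup (cleaned.map pvCatOf)).map
    (fun k => (k, PySem.List.sorted (cleaned.filter (fun c => pvCatOf c == k)) pvSortKey))

-- ===== PRECONDITION & SPEC =====
def Spec_get_active_constants (feature_columns : List String) (TARGET_VARIABLE : String) (out : List (String × List String)) : Prop := out = get_active_constants_alt feature_columns TARGET_VARIABLE
instance (feature_columns : List String) (TARGET_VARIABLE : String) (out : List (String × List String)) : Decidable (Spec_get_active_constants feature_columns TARGET_VARIABLE out) := by unfold Spec_get_active_constants; infer_instance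

-- ===== CLAIM (what is proved, stated in full; the proofs are below) =====
def Claim_equal_get_active_constants : Prop := ∀ (feature_columns : List String) (TARGET_VARIABLE : String), Dom_get_active_constants feature_columns TARGET_VARIABLE → Spec_get_active_constants feature_columns TARGET_VARIABLE (get_active_constants feature_columns TARGET_VARIABLE)

-- ===== LEMMAS AND PROOFS =====

-- dedup of an appended element: kept only on first appearance
theorem dedup_append_singleton (xs : List String) (a : String) :
    PySem.List.dedup (xs ++ [a])
    = if a ∈ xs then PySem.List.dedup xs else PySem.List.dedup xs ++ [a] := by
  show List.foldl PySem.Set.add PySem.Set.empty (xs ++ [a]) = _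
  rw [List.foldl_append]
  simp only [List.foldl_cons, List.foldl_nil]
  show PySem.Set.add (PySem.List.dedup xs) a = _
  unfold PySem.Set.add
  by_cases hm : a ∈ xs <;> simp [hm]

-- A's grouping loop, characterised: items = first-appearance keys, each with its filtered bucket.
theorem group_items (l : List String) :
    (l.foldl (fun d c => d.modify (pvCatOf c) [] (fun v => v ++ [c]))
      (PySem.Dict.empty : PySem.Dict String (List String))).items
    = (PySem.List.dedup (l.map pvCatOf)).map
        (fun k => (k, l.filter (fun c => pvCatOf c == k))) := by
  induction l using List.reverseRecOn with
  | nil => rfl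
  | append_singleton l x ih =>
    rw [List.foldl_append]
    simp only [List.foldl_cons, List.foldl_nil]
    set D := l.foldl (fun d c => d.modify (pvCatOf c) [] (fun v => v ++ [c]))
      (PySem.Dict.empty : PySem.Dict String (List String)) with hD
    rw [show D.modify (pvCatOf x) [] (fun v => v ++ [x])
        = D.insert (pvCatOf x) (D.getD (pvCatOf x) [] ++ [x]) from rfl]
    have hkeys : D.keys = PySem.List.dedup (l.map pvCatOf) := by
      simp [PySem.Dict.keys, ih, List.map_map, Function.comp_def]
    have hnodup : D.keys.Nodup := by
      rw [hkeys]; exact PySem.List.nodup_dedup _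
    by_cases hm : pvCatOf x ∈ l.map pvCatOf
    · have hcont : D.contains (pvCatOf x) = true :=
        (PySem.Dict.contains_iff_mem_keys D _).mpr
          (by rw [hkeys, PySem.List.mem_dedup]; exact hm)
      have hmemitems : (pvCatOf x, l.filter (fun c => pvCatOf c == pvCatOf x)) ∈ D.items := by
        rw [ih]
        exact List.mem_map_of_mem (by rw [PySem.List.mem_dedup]; exact hm)
      have hget : D.getD (pvCatOf x) [] = l.filter (fun c => pvCatOf c == pvCatOf x) :=
        PySem.Dict.getD_of_mem_items D hmemitems hnodup []
      rw [PySem.Dict.items_insert_of_contains D _ hcont, ih, hget]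
      simp only [List.map_map, List.map_append, List.map_cons, List.map_nil]
      rw [dedup_append_singleton, if_pos hm]
      apply List.map_congr_left
      intro k hk
      by_cases hkx : k = pvCatOf x
      · subst hkx
        simp [List.filter_append]
      · have hxk : pvCatOf x ≠ k := Ne.symm hkx
        simp [List.filter_append, hkx, hxk]
    · have hcont : D.contains (pvCatOf x) = false := by
        rw [← Bool.not_eq_true, PySem.Dict.contains_iff_mem_keys, hkeys, PySem.List.mem_dedup]
        exact hm
      rw [PySem.Dict.items_insert_of_not_contains D _ hcont,
        PySem.Dict.getD_of_not_contains D [] hcont, ih]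
      simp only [List.map_append, List.map_cons, List.map_nil]
      rw [dedup_append_singleton, if_neg hm, List.map_append]
      have hfl : l.filter (fun c => pvCatOf c == pvCatOf x) = [] := by
        rw [List.filter_eq_nil_iff]
        intro c hc
        simp only [beq_iff_eq]
        exact fun h => hm (h ▸ List.mem_map_of_mem hc)
      congr 1
      · apply List.map_congr_left
        intro k hk
        have hkx : k ≠ pvCatOf x := by
          rintro rfl
          exact hm ((PySem.List.mem_dedup _ _).mp hk)
        have hxk : pvCatOf x ≠ k := Ne.symm hkx
        simp [List.filter_append, hxk]
      · simp [List.filter_append, hfl]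

-- ===== VERDICT (by name: the statement is the Claim_ definition above) =====
theorem get_active_constants_spec : Claim_equal_get_active_constants := by
  intro feature_columns TARGET_VARIABLE _
  unfold Spec_get_active_constants
  simp only [get_active_constants, get_active_constants_alt]
  generalize PySem.List.sorted
    (PySem.Set.ofList (List.filter (fun col => col != TARGET_VARIABLE) feature_columns))
    (fun x => x) = ACT
  rw [show List.foldl
        (fun d constant =>
          PySem.Dict.modify d (pvCatOf (pvRepl constant)) [] fun l => l ++ [pvRepl constant])
        PySem.Dict.empty ACT
      = List.foldl (fun d c => PySem.Dict.modify d (pvCatOf c) [] fun v => v ++ [c])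
        PySem.Dict.empty (ACT.map pvRepl) from
      (List.foldl_map (f := pvRepl)
        (g := fun d (c : String) => PySem.Dict.modify d (pvCatOf c) [] fun v => v ++ [c])).symm]
  rw [group_items]
  simp [List.map_map, Function.comp_def]
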